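-- pv_equiv track=rewrite | github.com/arsbw2802/Multimodal_Prediction | TDOST/TDOST/generate_embeddings_v1-1.py | get_kyoto7_sensor_global_context
-- ===== SOURCE A (Python) =====
-- def get_kyoto7_sensor_global_context(raw_sensor):
--     sensor_mapping = {
--         ("M01",): "between home entrance aisle and living room near TV shelf",
--         ("M02",): "in living room near TV shelf",
--         ("M03", "M04", "M05", "M11", "M13", "M14"): "in living room",
--         ("M06", "M07"): "in living room near couch",
--         ("M08",): "in living room near hall",
--         ("M09", "M10"): "in dining room",
--         ("M12",): "in living room near back door",
--         ("M15",): "in living room near kitchen",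
--         ("M16",): "in kitchen near living room",
--         ("M17",): "in kitchen",
--         ("M18",): "in kitchen near sink",
--         ("M19",): "in kitchen near kitchen closet",
--         ("M20",): "in kitchen inside kitchen closet",
--         ("M21", "M22", "M25"): "in home entrance aisle",
--         ("M23",): "in home entrance aisle near living room",
--         ("M24",): "in home entrance aisle near front door",
--         ("M26",): "on stairs near home entrance aisle",
--         ("M27", "M28", "M29"): "in aisle near first bedroom",
--         ("M30",): "between aisle and first bedroom",
--         ("M31", "M32"): "in first bedroom near desk",
--         ("M33", "M36"): "in first bedroom",
--         ("M34", "M35"): "in first bedroom near bed",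
--         ("M37",): "between aisle and bathroom",
--         ("M38",): "in bathroom near basin",
--         ("M39",): "in bathroom near bath",
--         ("M40",): "in bathroom",
--         ("M41",): "in bathroom near toilet",
--         ("M42",): "between aisle and work area",
--         ("M43", "M44"): "between aisle and second bedroom",
--         ("M45", "M50"): "in second bedroom",
--         ("M46", "M47"): "in second bedroom near bed",
--         ("M48", "M49"): "in second bedroom near desk",
--         ("M51",): "in kitchen inside pantry",
--         ("D01",): "on front door",
--         ("D02",): "on back door",
--         ("D03",): "on the door of first bedroom",
--         ("D04",): "on the door of second bedroom",
--         ("D05",): "on bathroom door",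
--         ("D06",): "on toilet door inside bathroom",
--         ("D07", "D14", "D15", "D16"): "on kitchen cabinet door",
--         ("D08",): "on refrigerator door",
--         ("D09",): "on fridge door",
--         ("D10",): "on microwave door",
--         ("D11",): "on kitchen pantry door",
--         ("D12",): "on home entrance closet door",
--         ("D13",): "on living room TV door",
--         ("I03",): "on living room TV shelf",
--         ("L04",): "for living space",
--         ("L06",): "for stairs near home entrance",
--         ("L09",): "for workplace",
--         ("L10",): "for first bedroom",
--         ("L11",): "for bathroom",
--         ("L12",): "for shower in bathroom",
--         ("L13",): "for shower fan in bathroom",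
--         ("AD1-A",): "in kitchen near stove",
--         ("AD1-B", "AD1-C"): "in kitchen near sink"
--     }
--
--     # Iterate through the dictionary and return the context if the raw_sensor matches
--     for sensor_codes, context in sensor_mapping.items():
--         if raw_sensor in sensor_codes:
--             return context
--
--     return None  # Or a default context if no match is found
-- ===== SOURCE B (Python) =====
-- def get_kyoto7_sensor_global_context(raw_sensor):
--     sensor_mapping = {
--         "M01": "between home entrance aisle and living room near TV shelf",
--         "M02": "in living room near TV shelf",
--         "M03": "in living room",
--         "M04": "in living room",
--         "M05": "in living room",
--         "M11": "in living room",
--         "M13": "in living room",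
--         "M14": "in living room",
--         "M06": "in living room near couch",
--         "M07": "in living room near couch",
--         "M08": "in living room near hall",
--         "M09": "in dining room",
--         "M10": "in dining room",
--         "M12": "in living room near back door",
--         "M15": "in living room near kitchen",
--         "M16": "in kitchen near living room",
--         "M17": "in kitchen",
--         "M18": "in kitchen near sink",
--         "M19": "in kitchen near kitchen closet",
--         "M20": "in kitchen inside kitchen closet",
--         "M21": "in home entrance aisle",
--         "M22": "in home entrance aisle",
--         "M25": "in home entrance aisle",
--         "M23": "in home entrance aisle near living room",
--         "M24": "in home entrance aisle near front door",
--         "M26": "on stairs near home entrance aisle",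
--         "M27": "in aisle near first bedroom",
--         "M28": "in aisle near first bedroom",
--         "M29": "in aisle near first bedroom",
--         "M30": "between aisle and first bedroom",
--         "M31": "in first bedroom near desk",
--         "M32": "in first bedroom near desk",
--         "M33": "in first bedroom",
--         "M36": "in first bedroom",
--         "M34": "in first bedroom near bed",
--         "M35": "in first bedroom near bed",
--         "M37": "between aisle and bathroom",
--         "M38": "in bathroom near basin",
--         "M39": "in bathroom near bath",
--         "M40": "in bathroom",
--         "M41": "in bathroom near toilet",
--         "M42": "between aisle and work area",
--         "M43": "between aisle and second bedroom",
--         "M44": "between aisle and second bedroom",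
--         "M45": "in second bedroom",
--         "M50": "in second bedroom",
--         "M46": "in second bedroom near bed",
--         "M47": "in second bedroom near bed",
--         "M48": "in second bedroom near desk",
--         "M49": "in second bedroom near desk",
--         "M51": "in kitchen inside pantry",
--         "D01": "on front door",
--         "D02": "on back door",
--         "D03": "on the door of first bedroom",
--         "D04": "on the door of second bedroom",
--         "D05": "on bathroom door",
--         "D06": "on toilet door inside bathroom",
--         "D07": "on kitchen cabinet door",
--         "D14": "on kitchen cabinet door",
--         "D15": "on kitchen cabinet door",
--         "D16": "on kitchen cabinet door",
--         "D08": "on refrigerator door",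
--         "D09": "on fridge door",
--         "D10": "on microwave door",
--         "D11": "on kitchen pantry door",
--         "D12": "on home entrance closet door",
--         "D13": "on living room TV door",
--         "I03": "on living room TV shelf",
--         "L04": "for living space",
--         "L06": "for stairs near home entrance",
--         "L09": "for workplace",
--         "L10": "for first bedroom",
--         "L11": "for bathroom",
--         "L12": "for shower in bathroom",
--         "L13": "for shower fan in bathroom",
--         "AD1-A": "in kitchen near stove",
--         "AD1-B": "in kitchen near sink",
--         "AD1-C": "in kitchen near sink",
--     }
--     return sensor_mapping.get(raw_sensor)
-- ===== Notes on version B (the rewrite author's own statement) =====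
-- stated objective: idiomatic
-- what changed: Replaces the loop over tuple-keyed groups (membership test per group) by one flat dict keyed by each individual sensor code and a single .get(raw_sensor) with no loop.
import Mathlib
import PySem

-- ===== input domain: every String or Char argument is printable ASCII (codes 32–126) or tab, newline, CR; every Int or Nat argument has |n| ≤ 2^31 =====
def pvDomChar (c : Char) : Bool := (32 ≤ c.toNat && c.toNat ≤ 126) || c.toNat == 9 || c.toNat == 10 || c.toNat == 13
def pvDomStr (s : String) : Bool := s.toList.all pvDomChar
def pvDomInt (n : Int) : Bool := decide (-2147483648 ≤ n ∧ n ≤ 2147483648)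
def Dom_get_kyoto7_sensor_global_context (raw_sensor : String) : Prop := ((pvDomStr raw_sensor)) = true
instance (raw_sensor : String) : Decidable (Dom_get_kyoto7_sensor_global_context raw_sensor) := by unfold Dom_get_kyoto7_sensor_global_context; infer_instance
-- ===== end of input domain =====

-- B replaces A's loop over tuple-keyed groups by a single O(1) flat-dict .get with every code expanded to its own key; idiomatic, no loop.

-- ===== PORT A =====
-- the tuple-keyed dict, as an insertion-ordered list of (codes, context) groups
def kyoto7_groups : List (List String × String) :=
  [(["M01"], "between home entrance aisle and living room near TV shelf"),
   (["M02"], "in living room near TV shelf"),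
   (["M03", "M04", "M05", "M11", "M13", "M14"], "in living room"),
   (["M06", "M07"], "in living room near couch"),
   (["M08"], "in living room near hall"),
   (["M09", "M10"], "in dining room"),
   (["M12"], "in living room near back door"),
   (["M15"], "in living room near kitchen"),
   (["M16"], "in kitchen near living room"),
   (["M17"], "in kitchen"),
   (["M18"], "in kitchen near sink"),
   (["M19"], "in kitchen near kitchen closet"),
   (["M20"], "in kitchen inside kitchen closet"),
   (["M21", "M22", "M25"], "in home entrance aisle"),
   (["M23"], "in home entrance aisle near living room"),
   (["M24"], "in home entrance aisle near front door"),
   (["M26"], "on stairs near home entrance aisle"),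
   (["M27", "M28", "M29"], "in aisle near first bedroom"),
   (["M30"], "between aisle and first bedroom"),
   (["M31", "M32"], "in first bedroom near desk"),
   (["M33", "M36"], "in first bedroom"),
   (["M34", "M35"], "in first bedroom near bed"),
   (["M37"], "between aisle and bathroom"),
   (["M38"], "in bathroom near basin"),
   (["M39"], "in bathroom near bath"),
   (["M40"], "in bathroom"),
   (["M41"], "in bathroom near toilet"),
   (["M42"], "between aisle and work area"),
   (["M43", "M44"], "between aisle and second bedroom"),
   (["M45", "M50"], "in second bedroom"),
   (["M46", "M47"], "in second bedroom near bed"),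
   (["M48", "M49"], "in second bedroom near desk"),
   (["M51"], "in kitchen inside pantry"),
   (["D01"], "on front door"),
   (["D02"], "on back door"),
   (["D03"], "on the door of first bedroom"),
   (["D04"], "on the door of second bedroom"),
   (["D05"], "on bathroom door"),
   (["D06"], "on toilet door inside bathroom"),
   (["D07", "D14", "D15", "D16"], "on kitchen cabinet door"),
   (["D08"], "on refrigerator door"),
   (["D09"], "on fridge door"),
   (["D10"], "on microwave door"),
   (["D11"], "on kitchen pantry door"),
   (["D12"], "on home entrance closet door"),
   (["D13"], "on living room TV door"),
   (["I03"], "on living room TV shelf"),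
   (["L04"], "for living space"),
   (["L06"], "for stairs near home entrance"),
   (["L09"], "for workplace"),
   (["L10"], "for first bedroom"),
   (["L11"], "for bathroom"),
   (["L12"], "for shower in bathroom"),
   (["L13"], "for shower fan in bathroom"),
   (["AD1-A"], "in kitchen near stove"),
   (["AD1-B", "AD1-C"], "in kitchen near sink")]

-- the 'for sensor_codes, context in …: if raw_sensor in sensor_codes: return context' loop
def kyoto7_loop (gs : List (List String × String)) (raw_sensor : String) : Option String :=
  match gs with
  | [] => none
  | (codes, ctx) :: rest =>
      if codes.contains raw_sensor then some ctx else kyoto7_loop rest raw_sensor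

def get_kyoto7_sensor_global_context (raw_sensor : String) : Option String :=
  kyoto7_loop kyoto7_groups raw_sensor

-- ===== PORT B =====
-- the flat dict literal of Source B, one key per sensor code
def kyoto7_flat : PySem.Dict String String := PySem.Dict.ofList
  [("M01", "between home entrance aisle and living room near TV shelf"),
   ("M02", "in living room near TV shelf"),
   ("M03", "in living room"),
   ("M04", "in living room"),
   ("M05", "in living room"),
   ("M11", "in living room"),
   ("M13", "in living room"),
   ("M14", "in living room"),
   ("M06", "in living room near couch"),
   ("M07", "in living room near couch"),
   ("M08", "in living room near hall"),
   ("M09", "in dining room"),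
   ("M10", "in dining room"),
   ("M12", "in living room near back door"),
   ("M15", "in living room near kitchen"),
   ("M16", "in kitchen near living room"),
   ("M17", "in kitchen"),
   ("M18", "in kitchen near sink"),
   ("M19", "in kitchen near kitchen closet"),
   ("M20", "in kitchen inside kitchen closet"),
   ("M21", "in home entrance aisle"),
   ("M22", "in home entrance aisle"),
   ("M25", "in home entrance aisle"),
   ("M23", "in home entrance aisle near living room"),
   ("M24", "in home entrance aisle near front door"),
   ("M26", "on stairs near home entrance aisle"),
   ("M27", "in aisle near first bedroom"),
   ("M28", "in aisle near first bedroom"),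
   ("M29", "in aisle near first bedroom"),
   ("M30", "between aisle and first bedroom"),
   ("M31", "in first bedroom near desk"),
   ("M32", "in first bedroom near desk"),
   ("M33", "in first bedroom"),
   ("M36", "in first bedroom"),
   ("M34", "in first bedroom near bed"),
   ("M35", "in first bedroom near bed"),
   ("M37", "between aisle and bathroom"),
   ("M38", "in bathroom near basin"),
   ("M39", "in bathroom near bath"),
   ("M40", "in bathroom"),
   ("M41", "in bathroom near toilet"),
   ("M42", "between aisle and work area"),
   ("M43", "between aisle and second bedroom"),
   ("M44", "between aisle and second bedroom"),
   ("M45", "in second bedroom"),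
   ("M50", "in second bedroom"),
   ("M46", "in second bedroom near bed"),
   ("M47", "in second bedroom near bed"),
   ("M48", "in second bedroom near desk"),
   ("M49", "in second bedroom near desk"),
   ("M51", "in kitchen inside pantry"),
   ("D01", "on front door"),
   ("D02", "on back door"),
   ("D03", "on the door of first bedroom"),
   ("D04", "on the door of second bedroom"),
   ("D05", "on bathroom door"),
   ("D06", "on toilet door inside bathroom"),
   ("D07", "on kitchen cabinet door"),
   ("D14", "on kitchen cabinet door"),
   ("D15", "on kitchen cabinet door"),
   ("D16", "on kitchen cabinet door"),
   ("D08", "on refrigerator door"),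
   ("D09", "on fridge door"),
   ("D10", "on microwave door"),
   ("D11", "on kitchen pantry door"),
   ("D12", "on home entrance closet door"),
   ("D13", "on living room TV door"),
   ("I03", "on living room TV shelf"),
   ("L04", "for living space"),
   ("L06", "for stairs near home entrance"),
   ("L09", "for workplace"),
   ("L10", "for first bedroom"),
   ("L11", "for bathroom"),
   ("L12", "for shower in bathroom"),
   ("L13", "for shower fan in bathroom"),
   ("AD1-A", "in kitchen near stove"),
   ("AD1-B", "in kitchen near sink"),
   ("AD1-C", "in kitchen near sink")]

def get_kyoto7_sensor_global_context_alt (raw_sensor : String) : Option String :=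
  kyoto7_flat.get? raw_sensor

-- ===== PRECONDITION & SPEC =====
def Spec_get_kyoto7_sensor_global_context (raw_sensor : String) (out : Option String) : Prop := out = get_kyoto7_sensor_global_context_alt raw_sensor
instance (raw_sensor : String) (out : Option String) : Decidable (Spec_get_kyoto7_sensor_global_context raw_sensor out) := by unfold Spec_get_kyoto7_sensor_global_context; infer_instance

-- ===== CLAIM (what is proved, stated in full; the proofs are below) =====
def Claim_equal_get_kyoto7_sensor_global_context : Prop := ∀ (raw_sensor : String), Dom_get_kyoto7_sensor_global_context raw_sensor → Spec_get_kyoto7_sensor_global_context raw_sensor (get_kyoto7_sensor_global_context raw_sensor)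

-- ===== LEMMAS AND PROOFS =====

-- looking up the flattened association list of a group list = A's group loop
def kyoto7_flatten (gs : List (List String × String)) : List (String × String) :=
  gs.flatMap (fun p => p.1.map (fun k => (k, p.2)))

theorem get?_mk_flatten (gs : List (List String × String)) (s : String) :
    (PySem.Dict.mk (kyoto7_flatten gs)).get? s = kyoto7_loop gs s := by
  induction gs with
  | nil => rfl
  | cons p rest ih =>
      obtain ⟨codes, ctx⟩ := p
      induction codes with
      | nil => simpa [kyoto7_flatten, kyoto7_loop] using ih
      | cons k ks ihk =>
          have hstep : kyoto7_flatten ((k :: ks, ctx) :: rest)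
              = (k, ctx) :: kyoto7_flatten ((ks, ctx) :: rest) := rfl
          rw [hstep, PySem.Dict.get?_mk_cons, ihk]
          by_cases hk : k = s
          · simp [kyoto7_loop, hk]
          · simp [kyoto7_loop, hk, Ne.symm hk]

-- ===== VERDICT (by name: the statement is the Claim_ definition above) =====
set_option maxRecDepth 4000 in
theorem get_kyoto7_sensor_global_context_spec : Claim_equal_get_kyoto7_sensor_global_context := by
  intro s _
  unfold Spec_get_kyoto7_sensor_global_context get_kyoto7_sensor_global_context
    get_kyoto7_sensor_global_context_alt
  have h : kyoto7_flat = PySem.Dict.mk (kyoto7_flatten kyoto7_groups) := by rfl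
  rw [h, get?_mk_flatten]
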